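-- pv_equiv track=rewrite | github.com/eldstal/vibease | tools/vibease.py | ScrambleAndFragment
-- ===== SOURCE A (Python) =====
-- def Scramble(plaintext, key):
--   cryptext = [ b for b in plaintext.encode("ascii") ]
--
--   for i in range(len(cryptext)):
--     cryptext[i] = (cryptext[i] ^ key[i % len(key)]) + 1
--
--   return bytes(cryptext)
--
-- def ScrambleAndFragment(payload, key):
--   scrambled = Scramble(payload,key).decode("ascii").replace("\n", "")
--   n_blocks = int(len(scrambled) / 16)
--   if (len(scrambled) % 16 != 0):
--     n_blocks += 1
--
--   if (n_blocks == 1):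
--     # Single packet
--     return [ "*" + scrambled + "!" ]
--
--   packets = [ ]
--   for b in range(n_blocks):
--     chunk = scrambled[b*16:(b+1)*16]
--     if (b == 0):
--       # First packet
--       packets += [ "*" + chunk + ">" ]
--     elif (b == n_blocks - 1):
--       # Last packet
--       packets += [ "<" + chunk + "!" ]
--     else:
--       # Middle packets
--       packets += [ "<" + chunk + ">" ]
--
--   return packets
-- ===== SOURCE B (Python) =====
-- def Scramble(plaintext, key):
--   cryptext = [ b for b in plaintext.encode("ascii") ]
--
--   for i in range(len(cryptext)):
--     cryptext[i] = (cryptext[i] ^ key[i % len(key)]) + 1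
--
--   return bytes(cryptext)
--
-- def ScrambleAndFragment(payload, key):
--   s = Scramble(payload, key).decode("ascii").replace("\n", "")
--   if not s:
--     return []
--   def go(rest, opener):
--     # peel 16 chars off the front; the closer depends on whether anything remains
--     if len(rest) <= 16:
--       return [opener + rest + "!"]
--     return [opener + rest[:16] + ">"] + go(rest[16:], "<")
--   return go(s, "*")
-- ===== Notes on version B (the rewrite author's own statement) =====
-- stated objective: alternative
-- what changed: Replaces A's precomputed block count and index-arithmetic loop with a three-way position branch by a recursion that repeatedly peels 16 characters off the front of the remaining string, choosing the closing marker by whether anything remains and threading the opening marker as a parameter.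
import Mathlib
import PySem

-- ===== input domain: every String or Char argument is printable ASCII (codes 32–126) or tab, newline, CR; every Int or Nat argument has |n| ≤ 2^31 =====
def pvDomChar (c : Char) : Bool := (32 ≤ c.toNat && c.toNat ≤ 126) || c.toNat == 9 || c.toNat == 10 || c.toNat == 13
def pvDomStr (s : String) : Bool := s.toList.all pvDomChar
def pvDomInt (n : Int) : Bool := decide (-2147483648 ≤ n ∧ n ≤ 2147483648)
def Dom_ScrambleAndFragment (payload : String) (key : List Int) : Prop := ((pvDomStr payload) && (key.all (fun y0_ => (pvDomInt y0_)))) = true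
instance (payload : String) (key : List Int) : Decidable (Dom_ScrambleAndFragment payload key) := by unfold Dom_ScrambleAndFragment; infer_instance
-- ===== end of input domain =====

-- B replaces A's block-count arithmetic and three-way branch by a recursion peeling 16 chars
-- off the front of the remaining string (alternative decomposition, same cost).


-- ===== PORT A =====
-- shared module helper Scramble (called by both A and B): bytes are the Int byte values;
-- `cryptext[i] = (cryptext[i] ^ key[i % len(key)]) + 1` over `for i in range(len(cryptext))`
def pvScramble (plaintext : String) (key : List Int) : List Int :=
  let cryptext := plaintext.toList.map (fun c => (c.toNat : Int))
  (PySem.List.enumerate cryptext).map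
    (fun p => PySem.Int.bxor p.2 (PySem.List.pyGetD key (PySem.Int.mod p.1 (PySem.List.len key)) 0) + 1)

-- `.decode("ascii").replace("\n", "")` : bytes → chars, dropping newlines (exact for bytes ≤ 127, see Pre_)
def pvDecoded (payload : String) (key : List Int) : List Char :=
  ((pvScramble payload key).map (fun v => Char.ofNat v.toNat)).filter (fun c => c ≠ '\n')

-- A's fragmentation: block count, then a loop with first/middle/last branches
def pvFragA (s : List Char) : List String :=
  let n := s.length
  let nblocks := n / 16 + (if n % 16 ≠ 0 then 1 else 0)
  if nblocks = 1 then [String.ofList ('*' :: s ++ ['!'])]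
  else
    (List.range nblocks).map (fun b =>
      let chunk := (s.drop (b*16)).take 16     -- scrambled[b*16:(b+1)*16]
      if b = 0 then String.ofList ('*' :: chunk ++ ['>'])
      else if b = nblocks - 1 then String.ofList ('<' :: chunk ++ ['!'])
      else String.ofList ('<' :: chunk ++ ['>']))

def ScrambleAndFragment (payload : String) (key : List Int) : List String :=
  pvFragA (pvDecoded payload key)

-- ===== PORT B =====
-- B's fragmentation: recursion peeling 16 chars off the front, opener threaded as a parameter
def pvGo (rest : List Char) (opener : Char) : List String :=
  if rest.length ≤ 16 then [String.ofList (opener :: rest ++ ['!'])]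
  else String.ofList (opener :: rest.take 16 ++ ['>']) :: pvGo (rest.drop 16) '<'
termination_by rest.length
decreasing_by simp; omega

def pvFragB (s : List Char) : List String :=
  if s = [] then [] else pvGo s '*'

def ScrambleAndFragment_alt (payload : String) (key : List Int) : List String :=
  pvFragB (pvDecoded payload key)

-- ===== PRECONDITION & SPEC =====
-- Pre_ excludes exactly the inputs where the Python A raises: an empty key with a non-empty
-- payload (ZeroDivisionError in `i % len(key)`), and any position whose scrambled byte
-- `(byte ^ key[i % len(key)]) + 1` falls outside 0..127 (ValueError in bytes() / UnicodeDecodeError).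
def Pre_ScrambleAndFragment (payload : String) (key : List Int) : Prop :=
  payload = "" ∨ (key ≠ [] ∧ ∀ i, (h : i < payload.toList.length) →
    0 ≤ PySem.Int.bxor ((payload.toList[i]).toNat : Int) (key.getD (i % key.length) 0) + 1 ∧
    PySem.Int.bxor ((payload.toList[i]).toNat : Int) (key.getD (i % key.length) 0) + 1 ≤ 127)
instance (payload : String) (key : List Int) : Decidable (Pre_ScrambleAndFragment payload key) := by
  unfold Pre_ScrambleAndFragment; infer_instance

def pvWitness_ScrambleAndFragment : String × List Int := ("AB", [1, 2])

def Spec_ScrambleAndFragment (payload : String) (key : List Int) (out : List String) : Prop := out = ScrambleAndFragment_alt payload key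
instance (payload : String) (key : List Int) (out : List String) : Decidable (Spec_ScrambleAndFragment payload key out) := by unfold Spec_ScrambleAndFragment; infer_instance

-- ===== CLAIM (what is proved, stated in full; the proofs are below) =====
def Claim_equal_ScrambleAndFragment : Prop := ∀ (payload : String) (key : List Int), Dom_ScrambleAndFragment payload key → Pre_ScrambleAndFragment payload key → Spec_ScrambleAndFragment payload key (ScrambleAndFragment payload key)

-- ===== LEMMAS AND PROOFS =====

-- the common "marker" form both fragmentations compute: block b of m, opener o on block 0
def pvMark (o : Char) (s : List Char) (m b : Nat) : String :=
  String.ofList ((if b = 0 then o else '<') :: (s.drop (b*16)).take 16 ++ [if b = m - 1 then '!' else '>'])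

lemma pvGo_eq_map (n : Nat) : ∀ (s : List Char) (o : Char), s.length ≤ n → s ≠ [] →
    pvGo s o = (List.range ((s.length + 15) / 16)).map (pvMark o s ((s.length + 15) / 16)) := by
  induction n with
  | zero => intro s o h hne; cases s <;> simp_all
  | succ n ih =>
    intro s o h hne
    by_cases h16 : s.length ≤ 16
    · have hm : (s.length + 15) / 16 = 1 := by
        have : 0 < s.length := List.length_pos_iff.mpr hne
        omega
      rw [pvGo, if_pos h16, hm]
      simp [pvMark, List.take_of_length_le h16]
    · have hm2 : 2 ≤ (s.length + 15) / 16 := by omega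
      set m := (s.length + 15) / 16 with hm
      rw [pvGo, if_neg h16]
      have hlen : (s.drop 16).length = s.length - 16 := by simp
      have hm' : ((s.drop 16).length + 15) / 16 = m - 1 := by rw [hlen]; omega
      rw [ih (s.drop 16) '<' (by omega) (by simp [List.drop_eq_nil_iff]; omega)]
      rw [hm']
      have hr : List.range m = 0 :: (List.range (m - 1)).map (· + 1) := by
        conv_lhs => rw [show m = (m - 1) + 1 from by omega]
        rw [List.range_succ_eq_map]
      rw [hr]
      simp only [List.map_cons, List.map_map]
      congr 1
      · simp [pvMark]
        rw [if_neg (by omega)]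
      · apply List.map_congr_left
        intro b hb
        simp only [List.mem_range] at hb
        simp only [Function.comp_apply, pvMark, ite_self]
        rw [if_neg (Nat.succ_ne_zero b)]
        congr 2
        · rw [List.drop_drop, show 16 + b * 16 = (b + 1) * 16 from by omega]
        · have : b + 1 = m - 1 ↔ b = m - 1 - 1 := by omega
          simp [this]

lemma pvFragA_eq_map (s : List Char) (hne : s ≠ []) :
    pvFragA s = (List.range ((s.length + 15) / 16)).map (pvMark '*' s ((s.length + 15) / 16)) := by
  unfold pvFragA
  dsimp only
  have hpos : 0 < s.length := List.length_pos_iff.mpr hne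
  have hnb : s.length / 16 + (if s.length % 16 ≠ 0 then 1 else 0) = (s.length + 15) / 16 := by
    split_ifs <;> omega
  rw [hnb]
  set m := (s.length + 15) / 16 with hm
  by_cases hm1 : m = 1
  · rw [if_pos hm1, hm1]
    have h16 : s.length ≤ 16 := by omega
    simp [pvMark, List.take_of_length_le h16]
  · rw [if_neg hm1]
    apply List.map_congr_left
    intro b hb
    simp only [List.mem_range] at hb
    have hm2 : 2 ≤ m := by omega
    simp only [pvMark]
    by_cases hb0 : b = 0
    · subst hb0
      rw [if_pos rfl, if_pos rfl, if_neg (by omega)]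
    · rw [if_neg hb0, if_neg hb0]
      by_cases hbl : b = m - 1
      · simp [hbl]
      · simp [hbl]

lemma pv_frag_eq (s : List Char) : pvFragA s = pvFragB s := by
  unfold pvFragB
  by_cases hne : s = []
  · subst hne; simp [pvFragA]
  · rw [if_neg hne, pvFragA_eq_map s hne, pvGo_eq_map s.length s '*' le_rfl hne]

-- ===== VERDICT (by name: the statement is the Claim_ definition above) =====
theorem ScrambleAndFragment_spec : Claim_equal_ScrambleAndFragment := by
  intro payload key _ _
  unfold Spec_ScrambleAndFragment ScrambleAndFragment ScrambleAndFragment_alt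
  exact pv_frag_eq _
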